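-- pv_equiv track=rewrite | github.com/Plakine/MesProjets | Personnel/AdventOfCode/2015/Code/jour2.py | Part1
-- ===== SOURCE A (Python) =====
-- def Part1(data):
--     res = 0
--     for l in data:
--         cote1 = l[0]*l[1]
--         cote2 = l[1]*l[2]
--         cote3 = l[2]*l[0]
--         res += 2*(cote1+cote2+cote3)  # 2*l*w + 2*w*h + 2*h*l
--         if cote1 <= cote2 and cote1 <= cote3:
--             res += cote1
--         elif cote2 <= cote1 and cote2 <= cote3:
--             res += cote2
--         else:
--             res += cote3
--     return res
-- ===== SOURCE B (Python) =====
-- def Part1(data):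
--     # Divide and conquer: recursively split the list and sum the halves;
--     # per box, sort the three face areas and use the smallest as slack.
--     if not data:
--         return 0
--     if len(data) == 1:
--         l = data[0]
--         f0, f1, f2 = sorted((l[0] * l[1], l[1] * l[2], l[2] * l[0]))
--         return 2 * (f0 + f1 + f2) + f0
--     mid = len(data) // 2
--     return Part1(data[:mid]) + Part1(data[mid:])
-- ===== Notes on version B (the rewrite author's own statement) =====
-- stated objective: alternative
-- what changed: Replaced A's single left-to-right accumulator loop with per-box if/elif minimum chain by a recursive divide-and-conquer that splits the list in half and sums the two halves, computing each box's value by sorting its three face areas and taking the smallest as the slack.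
import Mathlib
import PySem

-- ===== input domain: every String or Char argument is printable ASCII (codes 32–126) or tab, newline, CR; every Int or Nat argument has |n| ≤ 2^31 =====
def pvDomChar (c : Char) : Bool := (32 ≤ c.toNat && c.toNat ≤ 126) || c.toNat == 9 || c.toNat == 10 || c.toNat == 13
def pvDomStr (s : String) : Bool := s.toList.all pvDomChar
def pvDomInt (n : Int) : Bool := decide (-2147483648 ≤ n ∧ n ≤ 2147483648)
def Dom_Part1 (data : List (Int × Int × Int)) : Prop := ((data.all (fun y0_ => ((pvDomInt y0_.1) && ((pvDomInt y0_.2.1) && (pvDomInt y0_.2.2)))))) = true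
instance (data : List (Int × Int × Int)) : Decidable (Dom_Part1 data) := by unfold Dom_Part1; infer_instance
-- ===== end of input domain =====

-- B replaces A's accumulator loop with if/elif chain by a divide-and-conquer recursion
-- (split the list in half, sum the halves) whose per-box value sorts the three face
-- areas and adds the smallest; objective: alternative. Return value only.

-- ===== PORT A =====
def Part1 (data : List (Int × Int × Int)) : Int :=
  data.foldl (fun res l =>
    let cote1 := l.1 * l.2.1
    let cote2 := l.2.1 * l.2.2
    let cote3 := l.2.2 * l.1
    let res := res + 2 * (cote1 + cote2 + cote3)
    if cote1 ≤ cote2 ∧ cote1 ≤ cote3 then res + cote1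
    else if cote2 ≤ cote1 ∧ cote2 ≤ cote3 then res + cote2
    else res + cote3) 0

-- ===== PORT B =====
-- f0, f1, f2 = sorted((l[0]*l[1], l[1]*l[2], l[2]*l[0])); the match transcribes the
-- 3-tuple unpacking (sorted preserves length, so the default branch is unreachable)
def pvBoxB (l : Int × Int × Int) : Int :=
  match PySem.List.sorted [l.1 * l.2.1, l.2.1 * l.2.2, l.2.2 * l.1] (fun a => a) false with
  | [f0, f1, f2] => 2 * (f0 + f1 + f2) + f0
  | _ => 0

-- data[:mid] / data[mid:] with 0 ≤ mid ≤ len(data) are exactly take/drop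
def Part1_alt : List (Int × Int × Int) → Int
  | [] => 0
  | [l] => pvBoxB l
  | a :: b :: t =>
    let mid := (a :: b :: t).length / 2
    Part1_alt ((a :: b :: t).take mid) + Part1_alt ((a :: b :: t).drop mid)
termination_by data => data.length
decreasing_by
  · simp; omega
  · simp; omega

-- ===== PRECONDITION & SPEC =====
def Spec_Part1 (data : List (Int × Int × Int)) (out : Int) : Prop := out = Part1_alt data
instance (data : List (Int × Int × Int)) (out : Int) : Decidable (Spec_Part1 data out) := by unfold Spec_Part1; infer_instance

-- ===== CLAIM =====
def Claim_equal_Part1 : Prop := ∀ (data : List (Int × Int × Int)), Dom_Part1 data → Spec_Part1 data (Part1 data)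

-- ===== LEMMAS AND PROOFS =====

-- A's per-box contribution
def pvBoxA (l : Int × Int × Int) : Int :=
  let cote1 := l.1 * l.2.1
  let cote2 := l.2.1 * l.2.2
  let cote3 := l.2.2 * l.1
  2 * (cote1 + cote2 + cote3) +
    (if cote1 ≤ cote2 ∧ cote1 ≤ cote3 then cote1
     else if cote2 ≤ cote1 ∧ cote2 ≤ cote3 then cote2
     else cote3)

theorem sorted3_box (x y z : Int) :
    (match PySem.List.sorted [x, y, z] (fun a => a) false with
     | [f0, f1, f2] => 2 * (f0 + f1 + f2) + f0
     | _ => 0) =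
    2 * (x + y + z) + (if x ≤ y ∧ x ≤ z then x else if y ≤ x ∧ y ≤ z then y else z) := by
  simp only [PySem.List.sorted, List.foldl]
  by_cases h1 : y < x <;> by_cases h2 : z < x <;> by_cases h3 : z < y <;>
    simp [PySem.List.insertBy, h1, h2, h3] <;> split_ifs <;> first | omega | ring_nf

theorem boxB_eq_boxA (l : Int × Int × Int) : pvBoxB l = pvBoxA l := by
  rcases l with ⟨a, b, c⟩
  simpa [pvBoxB, pvBoxA] using sorted3_box (a * b) (b * c) (c * a)

theorem alt_eq_sum (data : List (Int × Int × Int)) :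
    Part1_alt data = (data.map pvBoxA).sum := by
  induction data using Part1_alt.induct with
  | case1 => simp [Part1_alt]
  | case2 l => simp [Part1_alt, boxB_eq_boxA]
  | case3 a b t mid ih1 ih2 =>
    rw [Part1_alt]
    rw [show (a :: b :: t).length / 2 = mid from rfl, ih1, ih2]
    rw [← List.sum_append, ← List.map_append, List.take_append_drop]

theorem foldA_eq (data : List (Int × Int × Int)) : ∀ res : Int,
    data.foldl (fun res l =>
      let cote1 := l.1 * l.2.1
      let cote2 := l.2.1 * l.2.2
      let cote3 := l.2.2 * l.1
      let res := res + 2 * (cote1 + cote2 + cote3)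
      if cote1 ≤ cote2 ∧ cote1 ≤ cote3 then res + cote1
      else if cote2 ≤ cote1 ∧ cote2 ≤ cote3 then res + cote2
      else res + cote3) res = res + (data.map pvBoxA).sum := by
  induction data with
  | nil => intro res; simp
  | cons x xs ih =>
    intro res
    simp only [List.foldl_cons, ih, List.map_cons, List.sum_cons, pvBoxA]
    split_ifs <;> ring

-- ===== VERDICT =====
theorem Part1_spec : Claim_equal_Part1 := by
  intro data _
  unfold Spec_Part1 Part1
  rw [alt_eq_sum]
  simpa using foldA_eq data 0
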